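-- pv_equiv track=rewrite | github.com/waroczykmateusz/gielda | lib/analysis.py | wykryj_konflikt
-- ===== SOURCE A (Python) =====
-- def wykryj_konflikt(sygnaly):
--     typy_bycze = {"KUP", "SILNY KUP"}
--     typy_niedzwiedzie = {"UWAGA", "SPRZEDAJ", "SILNA SPRZEDAZ"}
--     rsi_bycze = any(typ in typy_bycze and "RSI" in opis for typ, opis, _ in sygnaly)
--     rsi_niedzwiedzie = any(typ in typy_niedzwiedzie and "RSI" in opis for typ, opis, _ in sygnaly)
--     macd_bycze = any(typ in typy_bycze and "MACD" in opis for typ, opis, _ in sygnaly)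
--     macd_niedzwiedzie = any(typ in typy_niedzwiedzie and "MACD" in opis for typ, opis, _ in sygnaly)
--     rsi_vs_macd = (rsi_bycze and macd_niedzwiedzie) or (rsi_niedzwiedzie and macd_bycze)
--     ogolny = any(typ in typy_bycze for typ, _, _ in sygnaly) and any(typ in typy_niedzwiedzie for typ, _, _ in sygnaly)
--     return rsi_vs_macd or ogolny
-- ===== SOURCE B (Python) =====
-- def wykryj_konflikt(sygnaly):
--     typy_bycze = frozenset({"KUP", "SILNY KUP"})
--     typy_niedzwiedzie = frozenset({"UWAGA", "SPRZEDAJ", "SILNA SPRZEDAZ"})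
--     rsi_b = rsi_n = macd_b = macd_n = jest_b = jest_n = False
--     for typ, opis, _ in sygnaly:
--         if typ in typy_bycze:
--             jest_b = True
--             rsi_b = rsi_b or "RSI" in opis
--             macd_b = macd_b or "MACD" in opis
--         elif typ in typy_niedzwiedzie:
--             jest_n = True
--             rsi_n = rsi_n or "RSI" in opis
--             macd_n = macd_n or "MACD" in opis
--     return (rsi_b and macd_n) or (rsi_n and macd_b) or (jest_b and jest_n)
-- ===== Notes on version B (the rewrite author's own statement) =====
-- stated objective: simpler
-- what changed: Six separate any/generator passes over the signal list are replaced by a single for-loop that classifies each signal once (bullish/bearish branch) and OR-accumulates six boolean flags, combined after the loop.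
import Mathlib
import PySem

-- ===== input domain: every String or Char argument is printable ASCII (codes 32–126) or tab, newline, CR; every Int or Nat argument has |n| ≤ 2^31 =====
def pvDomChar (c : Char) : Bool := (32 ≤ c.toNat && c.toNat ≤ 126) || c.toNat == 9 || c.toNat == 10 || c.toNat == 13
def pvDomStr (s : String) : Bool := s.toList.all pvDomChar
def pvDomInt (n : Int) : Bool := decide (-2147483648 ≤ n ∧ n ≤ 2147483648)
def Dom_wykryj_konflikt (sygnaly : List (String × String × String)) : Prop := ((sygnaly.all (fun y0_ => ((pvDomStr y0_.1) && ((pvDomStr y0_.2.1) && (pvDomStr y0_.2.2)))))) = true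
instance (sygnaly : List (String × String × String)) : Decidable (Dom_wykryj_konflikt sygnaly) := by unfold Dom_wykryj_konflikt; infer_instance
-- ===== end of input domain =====

-- B replaces A's six separate any-passes over the list by one loop that classifies each
-- signal once and OR-accumulates six boolean flags (objective: simpler, one pass).

-- ===== PORT A =====
-- typ in typy_bycze / typ in typy_niedzwiedzie (literal set-membership tests)
def pvTypB (t : String) : Bool := t == "KUP" || t == "SILNY KUP"
def pvTypN (t : String) : Bool := t == "UWAGA" || t == "SPRZEDAJ" || t == "SILNA SPRZEDAZ"

def wykryj_konflikt (sygnaly : List (String × String × String)) : Bool :=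
  let rsi_bycze := sygnaly.any (fun y => pvTypB y.1 && PySem.Str.isIn "RSI" y.2.1)
  let rsi_niedzwiedzie := sygnaly.any (fun y => pvTypN y.1 && PySem.Str.isIn "RSI" y.2.1)
  let macd_bycze := sygnaly.any (fun y => pvTypB y.1 && PySem.Str.isIn "MACD" y.2.1)
  let macd_niedzwiedzie := sygnaly.any (fun y => pvTypN y.1 && PySem.Str.isIn "MACD" y.2.1)
  let rsi_vs_macd := (rsi_bycze && macd_niedzwiedzie) || (rsi_niedzwiedzie && macd_bycze)
  let ogolny := sygnaly.any (fun y => pvTypB y.1) && sygnaly.any (fun y => pvTypN y.1)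
  rsi_vs_macd || ogolny

-- ===== PORT B =====
-- one fold carrying (rsi_b, rsi_n, macd_b, macd_n, jest_b, jest_n)
def pvStep (st : Bool × Bool × Bool × Bool × Bool × Bool) (y : String × String × String) :
    Bool × Bool × Bool × Bool × Bool × Bool :=
  let (rb, rn, mb, mn, jb, jn) := st
  let (typ, opis, _) := y
  if pvTypB typ then
    (rb || PySem.Str.isIn "RSI" opis, rn, mb || PySem.Str.isIn "MACD" opis, mn, true, jn)
  else if pvTypN typ then
    (rb, rn || PySem.Str.isIn "RSI" opis, mb, mn || PySem.Str.isIn "MACD" opis, jb, true)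
  else (rb, rn, mb, mn, jb, jn)

def wykryj_konflikt_alt (sygnaly : List (String × String × String)) : Bool :=
  let st := sygnaly.foldl pvStep (false, false, false, false, false, false)
  let (rb, rn, mb, mn, jb, jn) := st
  (rb && mn) || (rn && mb) || (jb && jn)

-- ===== PRECONDITION & SPEC =====
def Spec_wykryj_konflikt (sygnaly : List (String × String × String)) (out : Bool) : Prop := out = wykryj_konflikt_alt sygnaly
instance (sygnaly : List (String × String × String)) (out : Bool) : Decidable (Spec_wykryj_konflikt sygnaly out) := by unfold Spec_wykryj_konflikt; infer_instance

-- ===== CLAIM (what is proved, stated in full; the proofs are below) =====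
def Claim_equal_wykryj_konflikt : Prop := ∀ (sygnaly : List (String × String × String)), Dom_wykryj_konflikt sygnaly → Spec_wykryj_konflikt sygnaly (wykryj_konflikt sygnaly)

-- ===== LEMMAS AND PROOFS =====

-- the two type sets are disjoint
theorem pvTypB_not_pvTypN (t : String) (h : pvTypB t = true) : pvTypN t = false := by
  simp only [pvTypB, Bool.or_eq_true, beq_iff_eq] at h
  rcases h with rfl | rfl <;> decide

-- loop invariant: the fold equals the six any-scans, each OR-ed onto its starting flag
theorem pvStep_foldl (l : List (String × String × String))
    (rb rn mb mn jb jn : Bool) :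
    l.foldl pvStep (rb, rn, mb, mn, jb, jn) =
      (rb || l.any (fun y => pvTypB y.1 && PySem.Str.isIn "RSI" y.2.1),
       rn || l.any (fun y => pvTypN y.1 && PySem.Str.isIn "RSI" y.2.1),
       mb || l.any (fun y => pvTypB y.1 && PySem.Str.isIn "MACD" y.2.1),
       mn || l.any (fun y => pvTypN y.1 && PySem.Str.isIn "MACD" y.2.1),
       jb || l.any (fun y => pvTypB y.1),
       jn || l.any (fun y => pvTypN y.1)) := by
  induction l generalizing rb rn mb mn jb jn with
  | nil => simp
  | cons y l ih =>
    obtain ⟨typ, opis, rest⟩ := y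
    by_cases hb : pvTypB typ = true
    · have hn := pvTypB_not_pvTypN typ hb
      simp [pvStep, hb, hn, ih, Bool.or_assoc]
    · by_cases hn : pvTypN typ = true
      · simp [pvStep, hb, hn, ih, Bool.or_assoc]
      · simp at hb hn
        simp [pvStep, hb, hn, ih]

-- ===== VERDICT (by name: the statement is the Claim_ definition above) =====
theorem wykryj_konflikt_spec : Claim_equal_wykryj_konflikt := by
  intro sygnaly _
  unfold Spec_wykryj_konflikt wykryj_konflikt wykryj_konflikt_alt
  rw [pvStep_foldl]
  simp [Bool.or_assoc]
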